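-- pv_equiv track=rewrite | github.com/truongluan303/CodingChallenges | triplets_count.py | count_triplets
-- ===== SOURCE A (Python) =====
-- def count_triplets(t: int, arr: list) -> int:
--     """
--     count all the triplets of (a, b, c) such that:
--     a < b < c and (a + b + c) <= t
--     """
--     count = 0
--
--     arr.sort()
--
--     for i in range(len(arr) - 2):
--
--         l = i + 1
--         r = len(arr) - 1
--
--         while l < r:
--
--             if arr[i] + arr[l] + arr[r] <= t:
--                 count += r - l
--                 l += 1
--
--             else:
--                 r -= 1
--
--     return count
-- ===== SOURCE B (Python) =====
-- def count_triplets(t: int, arr: list) -> int: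
--     """
--     count all the triplets of (a, b, c) such that:
--     a < b < c and (a + b + c) <= t
--     """
--     arr.sort()
--     n = len(arr)
--     total = 0
--     for i in range(n):
--         for j in range(i + 1, n):
--             for k in range(j + 1, n):
--                 if arr[i] + arr[j] + arr[k] <= t:
--                     total += 1
--     return total
-- ===== Notes on version B (the rewrite author's own statement) =====
-- stated objective: alternative
-- what changed: Replaces the two-pointer sweep (which skips whole blocks of pairs and adds r-l at a time) by a direct exhaustive enumeration of all index triples i<j<k on the sorted array, counting each one individually.
import Mathlib
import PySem

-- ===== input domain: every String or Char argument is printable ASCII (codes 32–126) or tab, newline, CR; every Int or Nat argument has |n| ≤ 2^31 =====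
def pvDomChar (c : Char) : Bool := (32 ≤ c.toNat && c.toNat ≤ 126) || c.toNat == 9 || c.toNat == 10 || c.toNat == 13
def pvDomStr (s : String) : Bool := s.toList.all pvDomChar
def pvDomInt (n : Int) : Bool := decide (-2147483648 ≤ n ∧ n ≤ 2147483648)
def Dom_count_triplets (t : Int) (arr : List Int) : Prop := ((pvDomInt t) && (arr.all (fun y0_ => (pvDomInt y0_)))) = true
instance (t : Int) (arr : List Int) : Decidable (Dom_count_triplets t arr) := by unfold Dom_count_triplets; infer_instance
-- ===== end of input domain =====

-- B replaces A's two-pointer sweep by exhaustive enumeration of all triples i<j<k of the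
-- sorted array (alternative algorithm, not faster). Both Pythons sort arr in place; the
-- equivalence proved here is about the return value.

-- ===== PORT A =====
-- the 'while l < r' loop of A; arr[i], arr[l], arr[r] are always in range, ported as getD
def twoPtr (t : Int) (s : List Int) (i l r : Nat) : Int :=
  if l < r then
    if s.getD i 0 + s.getD l 0 + s.getD r 0 ≤ t then
      ((r : Int) - (l : Int)) + twoPtr t s i (l + 1) r
    else
      twoPtr t s i l (r - 1)
  else 0
termination_by r - l
decreasing_by all_goals omega

def count_triplets (t : Int) (arr : List Int) : Int :=
  let s := PySem.List.sorted arr (fun x => x) false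
  (List.range (s.length - 2)).foldl
    (fun count i => count + twoPtr t s i (i + 1) (s.length - 1)) 0

-- ===== PORT B =====
def count_triplets_alt (t : Int) (arr : List Int) : Int :=
  let s := PySem.List.sorted arr (fun x => x) false
  let n := s.length
  (List.range n).foldl (fun total i =>
    (List.range' (i + 1) (n - (i + 1))).foldl (fun total j =>
      (List.range' (j + 1) (n - (j + 1))).foldl (fun total k =>
        if s.getD i 0 + s.getD j 0 + s.getD k 0 ≤ t then total + 1 else total)
      total) total) 0

-- ===== PRECONDITION & SPEC =====
def Spec_count_triplets (t : Int) (arr : List Int) (out : Int) : Prop := out = count_triplets_alt t arr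
instance (t : Int) (arr : List Int) (out : Int) : Decidable (Spec_count_triplets t arr out) := by unfold Spec_count_triplets; infer_instance

-- ===== CLAIM (what is proved, stated in full; the proofs are below) =====
def Claim_equal_count_triplets : Prop := ∀ (t : Int) (arr : List Int), Dom_count_triplets t arr → Spec_count_triplets t arr (count_triplets t arr)

-- ===== LEMMAS AND PROOFS =====

-- indicator of a triple being counted
def ind (t : Int) (s : List Int) (i a b : Nat) : Int :=
  if s.getD i 0 + s.getD a 0 + s.getD b 0 ≤ t then 1 else 0

-- the canonical count of pairs a < b in [l, n) for a fixed first index i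
def S (t : Int) (s : List Int) (i l n : Nat) : Int :=
  ∑ a ∈ Finset.Ico l n, ∑ b ∈ Finset.Ico (a + 1) n, ind t s i a b

-- getD form of sortedness
theorem sorted_getD_mono (arr : List Int) (p q : Nat) (hpq : p ≤ q)
    (hq : q < (PySem.List.sorted arr (fun x => x) false).length) :
    (PySem.List.sorted arr (fun x => x) false).getD p 0 ≤
      (PySem.List.sorted arr (fun x => x) false).getD q 0 := by
  rw [List.getD_eq_getElem _ _ (lt_of_le_of_lt hpq hq), List.getD_eq_getElem _ _ hq]
  exact PySem.List.sorted_id_getElem_mono arr hpq hq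

-- A's two-pointer sweep counts exactly the pairs l ≤ a < b ≤ r with s[i]+s[a]+s[b] ≤ t
theorem twoPtr_eq (t : Int) (s : List Int) (i : Nat)
    (hmono : ∀ p q, p ≤ q → q < s.length → s.getD p 0 ≤ s.getD q 0) :
    ∀ m l r, r - l = m → r < s.length →
      twoPtr t s i l r = S t s i l (r + 1) := by
  intro m
  induction m using Nat.strong_induction_on with
  | _ m IH =>
    intro l r hm hr
    rw [twoPtr]
    by_cases hlr : l < r
    · simp only [if_pos hlr]
      by_cases hc : s.getD i 0 + s.getD l 0 + s.getD r 0 ≤ t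
      · simp only [if_pos hc]
        rw [IH (r - (l + 1)) (by omega) (l + 1) r rfl hr]
        have hsplit : S t s i l (r + 1) =
            (∑ b ∈ Finset.Ico (l + 1) (r + 1), ind t s i l b) + S t s i (l + 1) (r + 1) := by
          unfold S
          rw [Finset.sum_eq_sum_Ico_succ_bot (by omega : l < r + 1)]
        rw [hsplit]
        have hone : ∀ b ∈ Finset.Ico (l + 1) (r + 1), ind t s i l b = 1 := by
          intro b hb
          rw [Finset.mem_Ico] at hb
          have hble : s.getD b 0 ≤ s.getD r 0 := hmono b r (by omega) hr
          unfold ind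
          rw [if_pos (by omega)]
        rw [Finset.sum_congr rfl hone, Finset.sum_const, Nat.card_Ico, nsmul_eq_mul, mul_one]
        congr 1
        omega
      · simp only [if_neg hc]
        rw [IH (r - 1 - l) (by omega) l (r - 1) rfl (by omega)]
        have hr1 : r - 1 + 1 = r := by omega
        rw [hr1]
        unfold S
        rw [Finset.sum_Ico_succ_top (by omega : l ≤ r)]
        have hzero : ∑ b ∈ Finset.Ico (r + 1) (r + 1), ind t s i r b = 0 := by simp
        rw [hzero, add_zero]
        apply Finset.sum_congr rfl
        intro a ha
        rw [Finset.mem_Ico] at ha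
        rw [Finset.sum_Ico_succ_top (by omega : a + 1 ≤ r)]
        have hge : s.getD l 0 ≤ s.getD a 0 := hmono l a (by omega) (by omega)
        have hind : ind t s i a r = 0 := by
          unfold ind
          rw [if_neg (by omega)]
        rw [hind, add_zero]
    · simp only [if_neg hlr]
      symm
      unfold S
      apply Finset.sum_eq_zero
      intro a ha
      apply Finset.sum_eq_zero
      intro b hb
      rw [Finset.mem_Ico] at ha hb
      omega

-- folding 'acc + h x' over a list is the initial value plus the sum
theorem foldl_add_gen (h : Nat → Int) (step : Int → Nat → Int)
    (hstep : ∀ acc x, step acc x = acc + h x) :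
    ∀ (l : List Nat) (c : Int), l.foldl step c = c + (l.map h).sum := by
  intro l
  induction l with
  | nil => intro c; simp
  | cons x xs ih => intro c; simp [List.foldl_cons, hstep, ih, add_assoc]

theorem range'_map_sum (h : Nat → Int) :
    ∀ (m a : Nat), ((List.range' a m).map h).sum = ∑ x ∈ Finset.Ico a (a + m), h x := by
  intro m
  induction m with
  | zero => intro a; simp
  | succ m ih =>
    intro a
    rw [List.range'_succ, List.map_cons, List.sum_cons, ih,
      Finset.sum_eq_sum_Ico_succ_bot (by omega : a < a + (m + 1))]
    have : a + 1 + m = a + (m + 1) := by omega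
    rw [this]

theorem Ico_trunc (a n : Nat) : Finset.Ico a (a + (n - a)) = Finset.Ico a n := by
  apply Finset.ext
  intro x
  simp only [Finset.mem_Ico]
  omega

-- B's triple loop computes the triple sum
theorem alt_eq_sum (t : Int) (arr : List Int) :
    count_triplets_alt t arr =
      ∑ i ∈ Finset.range (PySem.List.sorted arr (fun x => x) false).length,
        S t (PySem.List.sorted arr (fun x => x) false) i (i + 1)
          (PySem.List.sorted arr (fun x => x) false).length := by
  unfold count_triplets_alt
  set s := PySem.List.sorted arr (fun x => x) false with hs
  set n := s.length with hn
  have h3 : ∀ (i j : Nat) (c : Int),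
      (List.range' (j + 1) (n - (j + 1))).foldl
        (fun total k => if s.getD i 0 + s.getD j 0 + s.getD k 0 ≤ t then total + 1 else total) c =
        c + ∑ k ∈ Finset.Ico (j + 1) n, ind t s i j k := by
    intro i j c
    rw [foldl_add_gen (fun k => ind t s i j k)
      (fun total k => if s.getD i 0 + s.getD j 0 + s.getD k 0 ≤ t then total + 1 else total)
      (by
        intro acc x
        dsimp only
        simp only [ind]
        split <;> omega)]
    rw [range'_map_sum, Ico_trunc]
  have h2 : ∀ (i : Nat) (c : Int),
      (List.range' (i + 1) (n - (i + 1))).foldl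
        (fun total j =>
          (List.range' (j + 1) (n - (j + 1))).foldl
            (fun total k => if s.getD i 0 + s.getD j 0 + s.getD k 0 ≤ t then total + 1 else total)
            total) c =
        c + S t s i (i + 1) n := by
    intro i c
    rw [foldl_add_gen (fun j => ∑ k ∈ Finset.Ico (j + 1) n, ind t s i j k) _
      (by intro acc x; exact h3 i x acc)]
    rw [range'_map_sum, Ico_trunc]
    rfl
  rw [foldl_add_gen (fun i => S t s i (i + 1) n) _ (by intro acc x; exact h2 x acc)]
  rw [List.range_eq_range', range'_map_sum, zero_add, Nat.zero_add, ← Finset.range_eq_Ico]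

-- A's fold computes the same sum, over range (n-2)
theorem a_eq_sum (t : Int) (arr : List Int) :
    count_triplets t arr =
      ∑ i ∈ Finset.range ((PySem.List.sorted arr (fun x => x) false).length - 2),
        twoPtr t (PySem.List.sorted arr (fun x => x) false) i (i + 1)
          ((PySem.List.sorted arr (fun x => x) false).length - 1) := by
  unfold count_triplets
  set s := PySem.List.sorted arr (fun x => x) false with hs
  rw [foldl_add_gen (fun i => twoPtr t s i (i + 1) (s.length - 1)) _ (by intro acc x; rfl)]
  rw [List.range_eq_range', range'_map_sum, zero_add, Nat.zero_add, ← Finset.range_eq_Ico]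

-- ===== VERDICT (by name: the statement is the Claim_ definition above) =====
theorem count_triplets_spec : Claim_equal_count_triplets := by
  unfold Claim_equal_count_triplets Spec_count_triplets
  intro t arr _
  rw [a_eq_sum, alt_eq_sum]
  set s := PySem.List.sorted arr (fun x => x) false with hs
  set n := s.length with hn
  have hmono : ∀ p q, p ≤ q → q < s.length → s.getD p 0 ≤ s.getD q 0 :=
    fun p q h1 h2 => sorted_getD_mono arr p q h1 h2
  have hrw : ∑ i ∈ Finset.range (n - 2), twoPtr t s i (i + 1) (n - 1) =
      ∑ i ∈ Finset.range (n - 2), S t s i (i + 1) n := by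
    apply Finset.sum_congr rfl
    intro i hi
    rw [Finset.mem_range] at hi
    have h := twoPtr_eq t s i hmono ((n - 1) - (i + 1)) (i + 1) (n - 1) rfl
      (by show n - 1 < n; omega)
    rw [h]
    have hn1 : n - 1 + 1 = n := by omega
    rw [hn1]
  rw [hrw]
  apply Finset.sum_subset
  · intro x hx
    rw [Finset.mem_range] at hx ⊢
    exact lt_of_lt_of_le hx (Nat.sub_le n 2)
  · intro i hi hni
    rw [Finset.mem_range] at hi
    rw [Finset.mem_range, not_lt] at hni
    unfold S
    apply Finset.sum_eq_zero
    intro a ha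
    apply Finset.sum_eq_zero
    intro b hb
    rw [Finset.mem_Ico] at ha hb
    omega
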